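-- pv_equiv track=rewrite | github.com/anjmhrjn/agentic-rag | setup_medium_kb_test.py | safe_yaml_string
-- ===== SOURCE A (Python) =====
-- def safe_yaml_string(value):
--     """
--     Safely format a string for YAML.
--     Quotes it if it contains special characters.
--     """
--     if not value:
--         return '""'
--
--     # Characters that need quoting in YAML
--     needs_quoting = [':', '#', '@', '&', '*', '!', '|', '>', "'", '"', '%', '[', ']', '{', '}']
--
--     if any(char in value for char in needs_quoting):
--         # Use double quotes and escape any internal quotes
--         escaped = value.replace('"', '\\"')
--         return f'"{escaped}"'
--
--     return value
-- ===== SOURCE B (Python) =====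
-- def safe_yaml_string(value):
--     if not value:
--         return '""'
--     quote = False
--     parts = []
--     for ch in value:
--         if ch in ':#@&*!|>\'"%[]{}':
--             quote = True
--         parts.append('\\"' if ch == '"' else ch)
--     if quote:
--         return '"' + ''.join(parts) + '"'
--     return value
-- ===== Notes on version B (the rewrite author's own statement) =====
-- stated objective: alternative
-- what changed: B fuses detection and escaping into one pass: a single loop over the characters builds the escaped output and the needs-quoting flag simultaneously, instead of A's staged approach of 15 substring searches followed by a separate replace pass.
import Mathlib
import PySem

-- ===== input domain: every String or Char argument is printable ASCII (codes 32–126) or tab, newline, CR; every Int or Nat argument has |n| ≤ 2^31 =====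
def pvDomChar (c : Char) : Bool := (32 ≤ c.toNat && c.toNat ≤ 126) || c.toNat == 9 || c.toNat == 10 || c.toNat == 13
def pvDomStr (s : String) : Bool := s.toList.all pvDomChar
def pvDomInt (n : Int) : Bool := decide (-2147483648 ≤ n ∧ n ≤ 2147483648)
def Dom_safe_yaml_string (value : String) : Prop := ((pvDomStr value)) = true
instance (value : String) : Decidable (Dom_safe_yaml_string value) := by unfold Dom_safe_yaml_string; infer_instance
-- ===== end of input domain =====

-- B fuses detection and escaping into a single pass with an accumulator, instead of
-- A's staged 15 substring searches followed by a separate replace pass (alternative).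

-- ===== PORT A =====
-- the fixed list of one-character strings A searches for
def pvNeedsQuoting : List String :=
  [":", "#", "@", "&", "*", "!", "|", ">", "'", "\"", "%", "[", "]", "{", "}"]

def safe_yaml_string (value : String) : String :=
  if value = "" then "\"\""
  else if pvNeedsQuoting.any (fun ch => PySem.Str.isIn ch value) then
    "\"" ++ PySem.Str.replace value "\"" "\\\"" ++ "\""
  else value

-- ===== PORT B =====
-- the special characters B tests membership against (the Python string literal)
def pvSpecialChars : List Char :=
  [':', '#', '@', '&', '*', '!', '|', '>', '\'', '\"', '%', '[', ']', '{', '}']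

def safe_yaml_string_alt (value : String) : String :=
  if value = "" then "\"\""
  else
    -- single loop: (quote, parts) accumulator, parts appended char by char
    let st := value.toList.foldl
      (fun (st : Bool × List Char) ch =>
        (st.1 || pvSpecialChars.contains ch,
         st.2 ++ (if ch = '\"' then ['\\', '\"'] else [ch])))
      (false, [])
    if st.1 then "\"" ++ String.ofList st.2 ++ "\"" else value

-- ===== PRECONDITION & SPEC =====
def Spec_safe_yaml_string (value : String) (out : String) : Prop := out = safe_yaml_string_alt value
instance (value : String) (out : String) : Decidable (Spec_safe_yaml_string value out) := by unfold Spec_safe_yaml_string; infer_instance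

-- ===== CLAIM (what is proved, stated in full; the proofs are below) =====
def Claim_equal_safe_yaml_string : Prop := ∀ (value : String), Dom_safe_yaml_string value → Spec_safe_yaml_string value (safe_yaml_string value)

-- ===== LEMMAS AND PROOFS =====

-- the escape step B performs per character
def pvEsc (ch : Char) : List Char := if ch = '\"' then ['\\', '\"'] else [ch]

-- B's fold computes (the any-test, the flatMap of the escape step)
theorem fold_closed (s : List Char) (b : Bool) (l : List Char) :
    s.foldl (fun (st : Bool × List Char) ch =>
        (st.1 || pvSpecialChars.contains ch, st.2 ++ pvEsc ch)) (b, l)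
      = (b || s.any (pvSpecialChars.contains ·), l ++ s.flatMap pvEsc) := by
  induction s generalizing b l with
  | nil => simp
  | cons c t ih =>
    simp only [List.foldl_cons, List.any_cons, List.flatMap_cons]
    rw [ih]
    simp [Bool.or_assoc]

-- replace with a single-char pattern is the flatMap of the escape step
theorem replace_go_single (s acc : List Char) (fuel : Nat) (h : s.length ≤ fuel) :
    PySem.Chars.replace.go ['\"'] ['\\', '\"'] fuel s acc
      = acc.reverse ++ s.flatMap pvEsc := by
  induction s generalizing fuel acc with
  | nil =>
    cases fuel <;> simp [PySem.Chars.replace.go]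
  | cons c t ih =>
    cases fuel with
    | zero => simp at h
    | succ f =>
      simp only [PySem.Chars.replace.go, List.isPrefixOf]
      by_cases hc : c = '\"'
      · subst hc
        rw [if_pos (by simp)]
        simp only [List.length_cons] at h
        rw [show List.drop ['\"'].length ('\"' :: t) = t from rfl]
        rw [ih _ _ (by omega)]
        simp [pvEsc]
      · rw [if_neg (by simp; intro h'; exact hc h'.symm)]
        simp only [List.length_cons] at h
        rw [ih _ _ (by omega)]
        simp [pvEsc, hc]

theorem replace_single (s : List Char) :
    PySem.Chars.replace s ['\"'] ['\\', '\"'] = s.flatMap pvEsc := by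
  rw [PySem.Chars.replace]
  simp only [List.isEmpty_cons]
  exact replace_go_single s [] s.length le_rfl

-- a one-character substring occurs in s iff the character is in s.toList
theorem isIn_single_iff (c : Char) (s : String) :
    PySem.Str.isIn (String.ofList [c]) s = true ↔ c ∈ s.toList := by
  rw [PySem.Str.isIn_iff_infix]
  constructor
  · intro h
    exact h.mem (by simp)
  · intro h
    obtain ⟨l, r, hlr⟩ := List.append_of_mem h
    exact ⟨l, r, by simp [hlr]⟩

-- A's any-over-specials test equals B's any-over-characters test
theorem any_tests_agree (value : String) :
    pvNeedsQuoting.any (fun ch => PySem.Str.isIn ch value)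
      = value.toList.any (pvSpecialChars.contains ·) := by
  rw [Bool.eq_iff_iff]
  simp only [List.any_eq_true, pvNeedsQuoting]
  constructor
  · rintro ⟨x, hx, hin⟩
    fin_cases hx <;>
      exact ⟨_, (isIn_single_iff _ value).mp hin, by decide⟩
  · rintro ⟨c, hc, hmem⟩
    have : c ∈ pvSpecialChars := by simpa using hmem
    fin_cases this <;>
      exact ⟨_, by decide, (isIn_single_iff _ value).mpr hc⟩

-- ===== VERDICT (by name: the statement is the Claim_ definition above) =====
theorem safe_yaml_string_spec : Claim_equal_safe_yaml_string := by
  intro value _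
  unfold Spec_safe_yaml_string safe_yaml_string safe_yaml_string_alt
  by_cases h0 : value = ""
  · simp [h0]
  · rw [if_neg h0, if_neg h0]
    have hfold := fold_closed value.toList false []
    simp only [show (fun (st : Bool × List Char) ch =>
        (st.1 || pvSpecialChars.contains ch,
         st.2 ++ (if ch = '\"' then ['\\', '\"'] else [ch])))
      = (fun (st : Bool × List Char) ch =>
        (st.1 || pvSpecialChars.contains ch, st.2 ++ pvEsc ch)) from rfl]
    rw [hfold]
    simp only [Bool.false_or, List.nil_append]
    rw [any_tests_agree]
    by_cases hq : value.toList.any (pvSpecialChars.contains ·)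
    · rw [if_pos hq, if_pos hq]
      have : PySem.Str.replace value "\"" "\\\"" = String.ofList (value.toList.flatMap pvEsc) := by
        rw [PySem.Str.replace]
        congr 1
        have h1 : ("\"" : String).toList = ['\"'] := by decide
        have h2 : ("\\\"" : String).toList = ['\\', '\"'] := by decide
        rw [h1, h2, replace_single]
      rw [this]
    · rw [if_neg hq, if_neg hq]
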